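-- pv_equiv track=rewrite | github.com/elifinancc/ilac-analiz-asistani | app.py | extract_drug_name
-- ===== SOURCE A (Python) =====
-- def extract_drug_name(text: str) -> str:
--     words = text.split()
--     candidates = [w for w in words if w.isupper() and len(w) > 3]
--     if candidates:
--         return candidates[0]
--     for w in words:
--         if w[0].isupper() and len(w) > 3:
--             return w
--     return text[:50] if text else "Bilinmiyor"
-- ===== SOURCE B (Python) =====
-- def extract_drug_name(text: str) -> str:
--     cap = None
--     for w in text.split():
--         if len(w) > 3:
--             if w.isupper():
--                 return w
--             if cap is None and w[0].isupper():
--                 cap = w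
--     if cap is not None:
--         return cap
--     return text[:50] if text else "Bilinmiyor"
-- ===== Notes on version B (the rewrite author's own statement) =====
-- stated objective: alternative
-- what changed: Replaced A's two scans (build the all-uppercase candidate list, then rescan the words for a capitalized one) with one single-pass loop that returns the first all-uppercase long word immediately while tracking the first capitalized long word in an accumulator.
import Mathlib
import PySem

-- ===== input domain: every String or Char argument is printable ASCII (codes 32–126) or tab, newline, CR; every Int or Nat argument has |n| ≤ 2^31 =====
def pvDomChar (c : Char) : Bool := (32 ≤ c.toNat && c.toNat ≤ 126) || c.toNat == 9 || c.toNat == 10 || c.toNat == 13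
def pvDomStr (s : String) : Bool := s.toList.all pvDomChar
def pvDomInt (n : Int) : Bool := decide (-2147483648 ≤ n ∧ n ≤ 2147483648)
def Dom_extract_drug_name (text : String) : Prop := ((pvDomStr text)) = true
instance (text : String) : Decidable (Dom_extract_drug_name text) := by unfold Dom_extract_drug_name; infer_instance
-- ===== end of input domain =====

-- B merges A's two scans (candidate-list build, then rescan) into one pass with an
-- early return and a tracked capitalized candidate; same return value everywhere.

-- str.isupper(): at least one cased character and no lowercase one — exact on the ASCII domain,
-- where the cased characters are exactly the ASCII letters.
def pyStrIsupper (w : List Char) : Bool :=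
  w.any (fun c => PySem.Chars.isupper c || PySem.Chars.islower c) &&
  w.all (fun c => !PySem.Chars.islower c)

-- w.isupper() and len(w) > 3
def pvUpredED (w : String) : Bool :=
  pyStrIsupper w.toList && decide (3 < w.toList.length)

-- w[0].isupper() and len(w) > 3  (split() words are nonempty, so w[0] never raises)
def pvCpredED (w : String) : Bool :=
  (match w.toList with | c :: _ => PySem.Chars.isupper c | [] => false) &&
  decide (3 < w.toList.length)

-- ===== PORT A =====
-- the 'for w in words: … return w' loop of A, with the final fallback
def pvALoopED (text : String) : List String → String
  | [] => if text ≠ "" then PySem.Str.slice text none (some 50) else "Bilinmiyor"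
  | w :: ws => if pvCpredED w then w else pvALoopED text ws

def extract_drug_name (text : String) : String :=
  let words := PySem.Str.split₀ text
  let candidates := words.filter pvUpredED
  match candidates with
  | c :: _ => c
  | [] => pvALoopED text words

-- ===== PORT B =====
-- single pass: early return on the first all-upper long word, accumulator 'cap' for the
-- first capitalized long word
def pvBLoopED (text : String) : List String → Option String → String
  | [], cap => match cap with
      | some c => c
      | none => if text ≠ "" then PySem.Str.slice text none (some 50) else "Bilinmiyor"
  | w :: ws, cap =>
    if decide (3 < w.toList.length) then
      if pyStrIsupper w.toList then w
      else if cap.isNone &&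
          (match w.toList with | c :: _ => PySem.Chars.isupper c | [] => false) then
        pvBLoopED text ws (some w)
      else pvBLoopED text ws cap
    else pvBLoopED text ws cap

def extract_drug_name_alt (text : String) : String :=
  pvBLoopED text (PySem.Str.split₀ text) none

-- ===== PRECONDITION & SPEC =====
def Spec_extract_drug_name (text : String) (out : String) : Prop := out = extract_drug_name_alt text
instance (text : String) (out : String) : Decidable (Spec_extract_drug_name text out) := by unfold Spec_extract_drug_name; infer_instance

-- ===== CLAIM (what is proved, stated in full; the proofs are below) =====
def Claim_equal_extract_drug_name : Prop := ∀ (text : String), Dom_extract_drug_name text → Spec_extract_drug_name text (extract_drug_name text)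

-- ===== LEMMAS AND PROOFS =====

-- loop invariant: B's single pass equals "first U-word of the rest, else the saved cap,
-- else A's second scan over the rest"
theorem pvBLoop_invED (text : String) (ws : List String) (cap : Option String) :
    pvBLoopED text ws cap =
      match ws.filter pvUpredED with
      | c :: _ => c
      | [] => match cap with
              | some c => c
              | none => pvALoopED text ws := by
  induction ws generalizing cap with
  | nil => rfl
  | cons w ws ih =>
    simp only [pvBLoopED, List.filter_cons, pvALoopED]
    by_cases hl : (3 < w.length)
    · by_cases hu : pyStrIsupper w.toList = true
      · have : pvUpredED w = true := by simp [pvUpredED, hu, hl]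
        simp [hl, hu, this]
      · have hU : pvUpredED w = false := by
          simp [pvUpredED]; intro h; exact absurd h hu
        by_cases hc : (match w.toList with | c :: _ => PySem.Chars.isupper c | [] => false) = true
        · have hC : pvCpredED w = true := by simp [pvCpredED, hc, hl]
          cases cap with
          | none => simp [hl, hu, hc, hU, hC, ih]
          | some c0 => simp [hl, hu, hc, hU, hC, ih]
        · have hC : pvCpredED w = false := by
            simp [pvCpredED]; intro h; exact absurd h hc
          simp [hl, hu, hc, hU, hC, ih]
    · have hU : pvUpredED w = false := by simp [pvUpredED, hl]
      have hC : pvCpredED w = false := by simp [pvCpredED, hl]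
      simp [hl, hU, hC, ih]

-- ===== VERDICT (by name: the statement is the Claim_ definition above) =====
theorem extract_drug_name_spec : Claim_equal_extract_drug_name := by
  intro text _
  unfold Spec_extract_drug_name extract_drug_name extract_drug_name_alt
  rw [pvBLoop_invED]
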